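-- pv_equiv track=rewrite | github.com/vlsevt/Python_Exercises | EXAM/exam10/exam.py | pair_star_recursive
-- ===== SOURCE A (Python) =====
-- def pair_star_recursive(s: str) -> str:
--     """
--     Compute a string where same adjacent symbols are separated by '*'.
--
--     Given a string, compute recursively a new string where identical chars
--     that are adjacent in the original string are separated from each other by a "*".
--
--     pair_star_recursive("abc") => "abc"
--     pair_star_recursive("aabc") => "a*abc"
--     pair_star_recursive("aaac") => "a*a*ac"
--     pair_star_recursive("") => ""
--     pair_star_recursive("aaaa") => "a*a*a*a"
--     """
--     if s == "":
--         return ""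
--     elif len(s) == 1:
--         return s
--     elif s[0] == s[1]:
--         return s[0] + "*" + pair_star_recursive(s[1:])
--     else:
--         return s[0] + pair_star_recursive(s[1:])
-- ===== SOURCE B (Python) =====
-- def pair_star_recursive(s: str) -> str:
--     # Group s into maximal runs of identical characters, then join each run with '*'.
--     runs = []
--     for ch in s:
--         if runs and runs[-1][-1] == ch:
--             runs[-1] = runs[-1] + ch
--         else:
--             runs.append(ch)
--     return ''.join('*'.join(run) for run in runs)
-- ===== Notes on version B (the rewrite author's own statement) =====
-- stated objective: alternative
-- what changed: B replaces A's per-character recursion (comparing each adjacent pair and recursing on the tail) by a single iterative pass that first groups the string into maximal runs of identical characters and then joins each run's characters with '*'.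
import Mathlib
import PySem

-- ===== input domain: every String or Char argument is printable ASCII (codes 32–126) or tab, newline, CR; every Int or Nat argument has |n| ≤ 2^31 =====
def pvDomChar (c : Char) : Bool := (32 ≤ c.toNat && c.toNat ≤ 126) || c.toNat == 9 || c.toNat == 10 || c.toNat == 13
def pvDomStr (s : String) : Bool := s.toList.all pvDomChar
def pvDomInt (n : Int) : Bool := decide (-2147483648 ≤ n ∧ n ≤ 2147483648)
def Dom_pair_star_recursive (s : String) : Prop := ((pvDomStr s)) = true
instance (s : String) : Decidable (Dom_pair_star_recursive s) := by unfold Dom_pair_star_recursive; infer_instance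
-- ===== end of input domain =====

-- B groups the string into maximal runs of identical characters and joins each run with '*',
-- replacing A's adjacent-pair recursion; objective: alternative (same cost, different shape).


-- ===== PORT A =====
-- A's recursion on the characters: empty / single char / compare s[0] with s[1], recurse on s[1:].
def pairStarRecA : List Char → List Char
  | [] => []
  | [c] => [c]
  | a :: b :: rest =>
      if a = b then a :: '*' :: pairStarRecA (b :: rest)
      else a :: pairStarRecA (b :: rest)

def pair_star_recursive (s : String) : String := String.mk (pairStarRecA s.toList)

-- ===== PORT B =====
-- one step of B's loop: extend the last run if its last char equals ch, else start a new run
def pairStarStepB (runs : List (List Char)) (ch : Char) : List (List Char) :=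
  match runs.getLast? with
  | none => runs ++ [[ch]]
  | some last =>
      if last.getLast? = some ch then runs.dropLast ++ [last ++ [ch]]
      else runs ++ [[ch]]

def pair_star_recursive_alt (s : String) : String :=
  let runs := s.toList.foldl pairStarStepB []
  String.mk ((runs.map (List.intersperse '*')).flatten)

-- ===== PRECONDITION & SPEC =====
def Spec_pair_star_recursive (s : String) (out : String) : Prop := out = pair_star_recursive_alt s
instance (s : String) (out : String) : Decidable (Spec_pair_star_recursive s out) := by unfold Spec_pair_star_recursive; infer_instance

-- ===== CLAIM (what is proved, stated in full; the proofs are below) =====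
def Claim_equal_pair_star_recursive : Prop := ∀ (s : String), Dom_pair_star_recursive s → Spec_pair_star_recursive s (pair_star_recursive s)

-- ===== LEMMAS AND PROOFS =====

-- flatten-of-interspersed-runs, the value B's loop is building
def pvRunsOut (runs : List (List Char)) : List Char :=
  (runs.map (List.intersperse '*')).flatten

theorem pvRunsOut_append (rs : List (List Char)) (x : List Char) :
    pvRunsOut (rs ++ [x]) = pvRunsOut rs ++ List.intersperse '*' x := by
  simp [pvRunsOut]

theorem intersperse_concat (l : List Char) (x : Char) (h : l ≠ []) :
    List.intersperse '*' (l ++ [x]) = List.intersperse '*' l ++ ['*', x] := by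
  induction l with
  | nil => exact absurd rfl h
  | cons a t ih =>
    cases t with
    | nil => simp [List.intersperse]
    | cons b u => simp_all [List.intersperse]

theorem pairStarRecA_cons (a : Char) (t : List Char) :
    pairStarRecA (a :: t)
      = a :: ((if t.head? = some a then ['*'] else []) ++ pairStarRecA t) := by
  cases t with
  | nil => simp [pairStarRecA]
  | cons b u =>
    by_cases h : a = b
    · simp [pairStarRecA, h]
    · simp [pairStarRecA, h, Ne.symm h]

theorem pvKey (s : List Char) (rs : List (List Char)) (r : List Char) (c : Char) :
    pvRunsOut (List.foldl pairStarStepB (rs ++ [r ++ [c]]) s)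
      = pvRunsOut (rs ++ [r ++ [c]])
        ++ (if s.head? = some c then ['*'] else []) ++ pairStarRecA s := by
  induction s generalizing rs r c with
  | nil => simp [pairStarRecA]
  | cons ch t ih =>
    have hlast : (rs ++ [r ++ [c]]).getLast? = some (r ++ [c]) := by simp
    have hlast2 : (r ++ [c]).getLast? = some c := by simp
    by_cases h : c = ch
    · subst h
      have hstep : pairStarStepB (rs ++ [r ++ [c]]) c = rs ++ [(r ++ [c]) ++ [c]] := by
        unfold pairStarStepB
        rw [hlast]
        simp only [if_pos hlast2, List.dropLast_concat]
      rw [List.foldl_cons, hstep, ih rs (r ++ [c]) c, pvRunsOut_append, pvRunsOut_append,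
          intersperse_concat (r ++ [c]) c (by simp), pairStarRecA_cons]
      simp
    · have hcond : ¬ ((r ++ [c]).getLast? = some ch) := by
        rw [hlast2]; simp [h]
      have hstep : pairStarStepB (rs ++ [r ++ [c]]) ch = (rs ++ [r ++ [c]]) ++ [[] ++ [ch]] := by
        unfold pairStarStepB
        rw [hlast]
        exact if_neg hcond
      rw [List.foldl_cons, hstep, ih (rs ++ [r ++ [c]]) [] ch, pvRunsOut_append,
          pvRunsOut_append, pairStarRecA_cons]
      simp [Ne.symm h]

theorem pvMain (l : List Char) :
    pvRunsOut (List.foldl pairStarStepB [] l) = pairStarRecA l := by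
  cases l with
  | nil => simp [pairStarRecA, pvRunsOut]
  | cons a t =>
    have hstep : pairStarStepB [] a = [[a]] := by simp [pairStarStepB]
    rw [List.foldl_cons, hstep]
    have := pvKey t [] [] a
    simp only [List.nil_append] at this
    rw [this, pairStarRecA_cons]
    simp [pvRunsOut, List.intersperse]

-- ===== VERDICT (by name: the statement is the Claim_ definition above) =====
theorem pair_star_recursive_spec : Claim_equal_pair_star_recursive := by
  intro s _
  unfold Spec_pair_star_recursive pair_star_recursive pair_star_recursive_alt
  exact congrArg String.mk (pvMain s.toList).symm
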